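-- pv_equiv track=rewrite | github.com/Aubar48/ispc-programacion | Bucles-While-Do while-FOR/ej1.py | contar_pares_impares_y_sumatoria
-- ===== SOURCE A (Python) =====
-- def contar_pares_impares_y_sumatoria(numeros):
--     pares = 0
--     impares = 0
--     sumatoria_pares = 0
--
--     for numero in numeros:
--         if numero % 2 == 0:
--             pares += 1
--             sumatoria_pares += numero
--         else:
--             impares += 1
--
--     return pares, impares, sumatoria_pares
-- ===== SOURCE B (Python) =====
-- def contar_pares_impares_y_sumatoria(numeros):
--     nums = list(numeros)
--     pares_vals = [n for n in nums if n % 2 == 0]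
--     pares = len(pares_vals)
--     return pares, len(nums) - pares, sum(pares_vals)
-- ===== Notes on version B (the rewrite author's own statement) =====
-- stated objective: simpler
-- what changed: Replaces the three-accumulator loop by a filter of the even values: pares and sumatoria_pares are length and sum of that list, impares is computed by complement as len(nums) - pares, never inspecting odd numbers.
import Mathlib
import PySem

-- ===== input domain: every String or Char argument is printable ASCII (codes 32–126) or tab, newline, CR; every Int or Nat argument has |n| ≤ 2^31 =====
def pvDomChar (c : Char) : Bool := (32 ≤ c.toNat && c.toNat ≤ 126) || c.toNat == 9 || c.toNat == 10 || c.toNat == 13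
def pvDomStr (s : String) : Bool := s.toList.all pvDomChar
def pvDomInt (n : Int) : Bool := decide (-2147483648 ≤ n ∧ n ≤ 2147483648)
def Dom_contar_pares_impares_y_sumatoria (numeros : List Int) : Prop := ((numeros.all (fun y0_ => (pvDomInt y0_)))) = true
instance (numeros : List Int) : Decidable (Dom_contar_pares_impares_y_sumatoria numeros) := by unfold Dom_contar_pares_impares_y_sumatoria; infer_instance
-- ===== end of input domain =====

-- B: filter the even values once; counts/sum come from that list, impares by complement. Objective: simpler.
-- ===== PORT A =====
-- literal port of A's loop: fold over the list carrying (pares, impares, sumatoria_pares)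
def contar_pares_impares_y_sumatoria (numeros : List Int) : Int × Int × Int :=
  numeros.foldl
    (fun st numero =>
      if PySem.Int.mod numero 2 == 0 then (st.1 + 1, st.2.1, st.2.2 + numero)
      else (st.1, st.2.1 + 1, st.2.2))
    (0, 0, 0)

-- ===== PORT B =====
def contar_pares_impares_y_sumatoria_alt (numeros : List Int) : Int × Int × Int :=
  let pares_vals := numeros.filter (fun n => PySem.Int.mod n 2 == 0)
  let pares : Int := pares_vals.length
  (pares, (numeros.length : Int) - pares, pares_vals.sum)

-- ===== PRECONDITION & SPEC =====
def Spec_contar_pares_impares_y_sumatoria (numeros : List Int) (out : Int × Int × Int) : Prop := out = contar_pares_impares_y_sumatoria_alt numeros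
instance (numeros : List Int) (out : Int × Int × Int) : Decidable (Spec_contar_pares_impares_y_sumatoria numeros out) := by unfold Spec_contar_pares_impares_y_sumatoria; infer_instance

-- ===== CLAIM (what is proved, stated in full; the proofs are below) =====
def Claim_equal_contar_pares_impares_y_sumatoria : Prop := ∀ (numeros : List Int), Dom_contar_pares_impares_y_sumatoria numeros → Spec_contar_pares_impares_y_sumatoria numeros (contar_pares_impares_y_sumatoria numeros)

-- ===== LEMMAS AND PROOFS =====

-- ===== VERDICT (by name: the statement is the Claim_ definition above) =====
-- loop invariant: the fold from any accumulator adds B's three quantities componentwise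
lemma contar_fold_acc (numeros : List Int) (p i s : Int) :
    numeros.foldl
      (fun st numero =>
        if PySem.Int.mod numero 2 == 0 then (st.1 + 1, st.2.1, st.2.2 + numero)
        else (st.1, st.2.1 + 1, st.2.2))
      (p, i, s)
    = (p + ((numeros.filter (fun n => PySem.Int.mod n 2 == 0)).length : Int),
       i + ((numeros.length : Int) - ((numeros.filter (fun n => PySem.Int.mod n 2 == 0)).length : Int)),
       s + (numeros.filter (fun n => PySem.Int.mod n 2 == 0)).sum) := by
  induction numeros generalizing p i s with
  | nil => simp
  | cons x xs ih =>
    by_cases h : PySem.Int.mod x 2 == 0 <;>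
      simp only [List.foldl_cons, List.filter_cons, h, if_true, if_false, Bool.false_eq_true,
        ite_true, ite_false, ih, List.length_cons, List.sum_cons] <;>
      push_cast <;> ring_nf

-- ===== VERDICT (by name: the statement is the Claim_ definition above) =====
theorem contar_pares_impares_y_sumatoria_spec : Claim_equal_contar_pares_impares_y_sumatoria := by
  intro numeros _
  unfold Spec_contar_pares_impares_y_sumatoria contar_pares_impares_y_sumatoria
    contar_pares_impares_y_sumatoria_alt
  rw [contar_fold_acc]
  simp
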